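-- pv_equiv track=rewrite | github.com/django-nerd/backend-repo_nm42ntbe_3pvo8i | main.py | ensure_spread_midi
-- ===== SOURCE A (Python) =====
-- from typing import List, Optional, Dict, Any
--
-- def midi_for_pc(pc: int, octave: int = 4) -> int:
--     # C4 = 60
--     base_c4 = 60
--     c_pc = 0  # C
--     semitone_from_c = (pc - c_pc) % 12
--     return base_c4 + semitone_from_c + (octave - 4) * 12
--
-- def ensure_spread_midi(pcs: List[int], base_octave: int = 4) -> List[int]:
--     # Spread chord notes upwards to avoid duplicates; ensure ascending order
--     used = set()
--     midis: List[int] = []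
--     cur_oct = base_octave
--     last_midi = None
--     for pc in pcs:
--         m = midi_for_pc(pc, cur_oct)
--         if last_midi is not None and m <= last_midi:
--             while m <= last_midi:
--                 cur_oct += 1
--                 m = midi_for_pc(pc, cur_oct)
--         midis.append(m)
--         last_midi = m
--     return midis
-- ===== SOURCE B (Python) =====
-- def ensure_spread_midi(pcs, base_octave=4):
--     # One pass: compute the needed octave jump by ceil division instead of
--     # incrementing the octave one step at a time.
--     out = []
--     base = 60 + (base_octave - 4) * 12   # midi of pitch-class 0 at current octave
--     last = None
--     for pc in pcs:
--         m = base + pc % 12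
--         if last is not None and m <= last:
--             jump = (last - m) // 12 + 1   # smallest k with m + 12k > last
--             base += 12 * jump
--             m += 12 * jump
--         out.append(m)
--         last = m
--     return out
-- ===== Notes on version B (the rewrite author's own statement) =====
-- stated objective: faster
-- what changed: Replaces the inner while-loop that raises the octave one step at a time with a single ceil-division computing the needed octave jump, and carries the current octave as a precomputed midi base.
import Mathlib
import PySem

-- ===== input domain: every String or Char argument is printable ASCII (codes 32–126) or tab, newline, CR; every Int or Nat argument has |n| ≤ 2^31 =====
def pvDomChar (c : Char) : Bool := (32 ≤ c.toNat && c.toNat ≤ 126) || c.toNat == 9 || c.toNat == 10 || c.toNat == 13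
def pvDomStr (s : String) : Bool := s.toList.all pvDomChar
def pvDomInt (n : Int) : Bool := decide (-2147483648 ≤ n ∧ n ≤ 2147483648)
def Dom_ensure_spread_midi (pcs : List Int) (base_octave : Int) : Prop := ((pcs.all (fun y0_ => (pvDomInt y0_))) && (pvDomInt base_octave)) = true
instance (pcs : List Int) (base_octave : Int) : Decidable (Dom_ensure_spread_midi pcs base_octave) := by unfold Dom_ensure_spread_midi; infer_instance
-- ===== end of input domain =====

-- B replaces A's step-by-step octave-raising inner while-loop with a single ceil-division jump (objective: faster).

-- ===== PORT A =====
def midi_for_pc (pc : Int) (octave : Int) : Int :=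
  60 + PySem.Int.mod (pc - 0) 12 + (octave - 4) * 12

-- the inner 'while m <= last_midi' loop of A; returns (cur_oct, m) after the loop
def spreadWhile (pc last cur_oct : Int) : Int × Int :=
  if h : midi_for_pc pc cur_oct ≤ last then spreadWhile pc last (cur_oct + 1)
  else (cur_oct, midi_for_pc pc cur_oct)
termination_by (last + 1 - midi_for_pc pc cur_oct).toNat
decreasing_by
  simp only [midi_for_pc, PySem.Int.mod] at h ⊢
  omega

def loopA : List Int → Int → Option Int → List Int → List Int
  | [], _, _, midis => midis
  | pc :: rest, cur_oct, last, midis =>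
    let m := midi_for_pc pc cur_oct
    match last with
    | some l =>
      if m ≤ l then
        let om := spreadWhile pc l cur_oct
        loopA rest om.1 (some om.2) (midis ++ [om.2])
      else loopA rest cur_oct (some m) (midis ++ [m])
    | none => loopA rest cur_oct (some m) (midis ++ [m])

def ensure_spread_midi (pcs : List Int) (base_octave : Int) : List Int :=
  loopA pcs base_octave none []

-- ===== PORT B =====
def loopB : List Int → Int → Option Int → List Int → List Int
  | [], _, _, out => out
  | pc :: rest, base, last, out =>
    let m := base + PySem.Int.mod pc 12
    match last with
    | some l =>
      if m ≤ l then
        let jump := PySem.Int.floordiv (l - m) 12 + 1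
        loopB rest (base + 12 * jump) (some (m + 12 * jump)) (out ++ [m + 12 * jump])
      else loopB rest base (some m) (out ++ [m])
    | none => loopB rest base (some m) (out ++ [m])

def ensure_spread_midi_alt (pcs : List Int) (base_octave : Int) : List Int :=
  loopB pcs (60 + (base_octave - 4) * 12) none []

-- ===== PRECONDITION & SPEC =====
def Spec_ensure_spread_midi (pcs : List Int) (base_octave : Int) (out : List Int) : Prop := out = ensure_spread_midi_alt pcs base_octave
instance (pcs : List Int) (base_octave : Int) (out : List Int) : Decidable (Spec_ensure_spread_midi pcs base_octave out) := by unfold Spec_ensure_spread_midi; infer_instance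

-- ===== CLAIM (what is proved, stated in full; the proofs are below) =====
def Claim_equal_ensure_spread_midi : Prop := ∀ (pcs : List Int) (base_octave : Int), Dom_ensure_spread_midi pcs base_octave → Spec_ensure_spread_midi pcs base_octave (ensure_spread_midi pcs base_octave)

-- ===== LEMMAS AND PROOFS =====

theorem midi_succ (pc o : Int) : midi_for_pc pc (o + 1) = midi_for_pc pc o + 12 := by
  simp only [midi_for_pc]; ring

-- the while loop computes exactly the ceil-division jump
theorem spreadWhile_eq_aux (pc l : Int) :
    ∀ (n : Nat) (o : Int), (l - midi_for_pc pc o).toNat ≤ n → midi_for_pc pc o ≤ l →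
      spreadWhile pc l o =
        (o + ((l - midi_for_pc pc o) / 12 + 1),
         midi_for_pc pc o + 12 * ((l - midi_for_pc pc o) / 12 + 1)) := by
  intro n
  induction n with
  | zero =>
    intro o hb hle
    have hm : l - midi_for_pc pc o = 0 := by omega
    unfold spreadWhile
    simp only [hle, dif_pos]
    unfold spreadWhile
    have h2 : ¬ midi_for_pc pc (o + 1) ≤ l := by rw [midi_succ]; omega
    simp only [h2, dif_neg, not_false_iff]
    rw [midi_succ]
    refine Prod.ext ?_ ?_ <;> simp <;> omega
  | succ n ih =>
    intro o hb hle
    unfold spreadWhile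
    simp only [hle, dif_pos]
    by_cases h2 : midi_for_pc pc (o + 1) ≤ l
    · have hb' : (l - midi_for_pc pc (o + 1)).toNat ≤ n := by rw [midi_succ]; omega
      rw [ih (o + 1) hb' h2, midi_succ]
      refine Prod.ext ?_ ?_ <;> simp <;> omega
    · unfold spreadWhile
      simp only [h2, dif_neg, not_false_iff]
      rw [midi_succ] at h2 ⊢
      refine Prod.ext ?_ ?_ <;> simp <;> omega

theorem spreadWhile_eq (pc l o : Int) (h : midi_for_pc pc o ≤ l) :
    spreadWhile pc l o =
      (o + ((l - midi_for_pc pc o) / 12 + 1),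
       midi_for_pc pc o + 12 * ((l - midi_for_pc pc o) / 12 + 1)) :=
  spreadWhile_eq_aux pc l (l - midi_for_pc pc o).toNat o le_rfl h

theorem midi_as_base (pc o : Int) :
    midi_for_pc pc o = (60 + (o - 4) * 12) + PySem.Int.mod pc 12 := by
  simp only [midi_for_pc, sub_zero]; ring

theorem loop_eq : ∀ (pcs : List Int) (o : Int) (last : Option Int) (acc : List Int),
    loopA pcs o last acc = loopB pcs (60 + (o - 4) * 12) last acc := by
  intro pcs
  induction pcs with
  | nil => intro o last acc; rfl
  | cons pc rest ih =>
    intro o last acc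
    simp only [loopA, loopB, ← midi_as_base pc o]
    match last with
    | none => exact ih o (some (midi_for_pc pc o)) _
    | some l =>
      by_cases h : midi_for_pc pc o ≤ l
      · simp only [h, if_pos]
        rw [spreadWhile_eq pc l o h]
        have hfd : PySem.Int.floordiv (l - midi_for_pc pc o) 12 = (l - midi_for_pc pc o) / 12 :=
          PySem.Int.floordiv_eq_ediv_of_pos (by omega)
        rw [hfd]
        have hbase : 60 + ((o + ((l - midi_for_pc pc o) / 12 + 1)) - 4) * 12
            = 60 + (o - 4) * 12 + 12 * ((l - midi_for_pc pc o) / 12 + 1) := by ring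
        rw [ih, hbase]
      · simp only [h, if_neg, not_false_iff]
        exact ih o (some (midi_for_pc pc o)) _

-- ===== VERDICT (by name: the statement is the Claim_ definition above) =====
theorem ensure_spread_midi_spec : Claim_equal_ensure_spread_midi := by
  intro pcs base_octave _
  unfold Spec_ensure_spread_midi ensure_spread_midi ensure_spread_midi_alt
  exact loop_eq pcs base_octave none []
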